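-- pv_equiv track=rewrite | github.com/preciousoben/Amazon-Best-Seller-Books-In-Depth-Exploratory-Data-Analysis | EDA on Amazon Best Seller Books.py | normalize_genres
-- ===== SOURCE A (Python) =====
-- genre_mapping = {
--     "Study Aid": ["Study Aid", "Study Aids"],
--     "Self-Help": ["Self Help", "Self-Help"],
--     "Children's Books": ["Children's books"],
--     "Juvenile Fiction": ["Juvenile Fiction"],
--     "Fiction": ["Fiction"],
--     "Philosophy": ["Philosophy"],
--     "Fiction": ["Romance and Fiction"],
--     "Spiritual": ["Bhagavadgītā"]
-- }
--
-- def normalize_genres(genres_str):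
--     genres_list = genres_str.split(', ')
--     normalized_genres = []
--     for genre in genres_list:
--         for normalized_genre, genre_aliases in genre_mapping.items():
--             if genre in genre_aliases:
--                 normalized_genres.append(normalized_genre)
--                 break
--         else:
--             normalized_genres.append(genre)
--     return ', '.join(normalized_genres)
-- ===== SOURCE B (Python) =====
-- genre_mapping = {
--     "Study Aid": ["Study Aid", "Study Aids"],
--     "Self-Help": ["Self Help", "Self-Help"],
--     "Children's Books": ["Children's books"],
--     "Juvenile Fiction": ["Juvenile Fiction"],
--     "Fiction": ["Fiction"],
--     "Philosophy": ["Philosophy"],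
--     "Fiction": ["Romance and Fiction"],
--     "Spiritual": ["Bhagavadgītā"]
-- }
--
-- # canonical name for each alias, built once (duplicate 'Fiction' key resolves
-- # exactly as in genre_mapping: it holds only its last value)
-- _alias_to_canon = {}
-- for _canon, _aliases in genre_mapping.items():
--     for _a in _aliases:
--         _alias_to_canon[_a] = _canon
--
-- def normalize_genres(genres_str):
--     # recursive descent over the raw string: peel one ', '-separated token at a
--     # time with find/slicing instead of materialising a split list and joining
--     i = genres_str.find(', ')
--     if i < 0:
--         return _alias_to_canon.get(genres_str, genres_str)
--     head = genres_str[:i]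
--     return _alias_to_canon.get(head, head) + ', ' + normalize_genres(genres_str[i + 2:])
-- ===== Notes on version B (the rewrite author's own statement) =====
-- stated objective: alternative
-- what changed: B never builds or joins a token list: it recursively peels one comma-space-separated token off the raw string with find/slicing and resolves it through an alias-to-canonical index built once, replacing A's split / nested membership-scan loops / join pipeline.
import Mathlib
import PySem

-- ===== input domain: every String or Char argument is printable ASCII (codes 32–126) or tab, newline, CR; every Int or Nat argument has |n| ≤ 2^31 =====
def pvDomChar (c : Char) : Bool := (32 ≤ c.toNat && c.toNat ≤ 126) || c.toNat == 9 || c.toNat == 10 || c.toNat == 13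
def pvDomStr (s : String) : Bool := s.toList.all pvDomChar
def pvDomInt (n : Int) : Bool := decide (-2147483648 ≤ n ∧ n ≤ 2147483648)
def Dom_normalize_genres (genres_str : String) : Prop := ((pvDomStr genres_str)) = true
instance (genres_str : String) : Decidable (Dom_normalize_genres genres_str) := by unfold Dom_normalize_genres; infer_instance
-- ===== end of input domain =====

-- B replaces A's split / nested alias-scan / join pipeline by a recursive descent over the raw
-- string (find the separator, resolve the peeled token through a once-built alias-to-canonical
-- index, recurse on the rest); objective: alternative.

-- shared module constant: the Python dict literal (duplicate "Fiction" key: overwrite in place, last wins)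
def genre_mapping : PySem.Dict String (List String) :=
  PySem.Dict.ofList
    [("Study Aid", ["Study Aid", "Study Aids"]),
     ("Self-Help", ["Self Help", "Self-Help"]),
     ("Children's Books", ["Children's books"]),
     ("Juvenile Fiction", ["Juvenile Fiction"]),
     ("Fiction", ["Fiction"]),
     ("Philosophy", ["Philosophy"]),
     ("Fiction", ["Romance and Fiction"]),
     ("Spiritual", ["Bhagavadgītā"])]

-- ===== PORT A =====
-- A: split on ', ', then for each genre scan genre_mapping.items() for the first item whose alias
-- list contains it (the for/break/else), appending the canonical name or the genre itself; join.
def normalize_genres (genres_str : String) : String :=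
  let genres_list := (PySem.Str.split? genres_str ", ").getD []   -- sep ≠ "", so split? is always some
  let normalized_genres := genres_list.foldl (fun acc genre =>
    match genre_mapping.items.find? (fun p => p.2.contains genre) with
    | some p => acc ++ [p.1]
    | none => acc ++ [genre]) []
  PySem.Str.join ", " normalized_genres

-- ===== PORT B =====
-- Source B's module-level index build: for canon, aliases in genre_mapping.items(): for a in aliases:
-- _alias_to_canon[a] = canon.  Keys/values are carried as List Char (the PySem string carrier).
def pvAliasToCanon : PySem.Dict (List Char) (List Char) :=
  genre_mapping.items.foldl
    (fun d p => p.2.foldl (fun d al => d.insert al.toList p.1.toList) d)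
    PySem.Dict.empty

-- Source B's recursion, on the code-point list (exact: PySem string ops are defined over List Char):
-- i = s.find(', '); if i < 0: return get(s, s); else get(s[:i]) + ', ' + rec(s[i+2:]),
-- with s[:i] / s[i+2:] as PySem.List.slice with the same bounds.  The Nat argument is only a
-- structural-recursion fuel (one unit per peeled token; s.length always suffices, see core_eq).
def pvNormCore : Nat -> List Char -> List Char
  | 0, s => pvAliasToCanon.getD s s
  | fuel + 1, s =>
    let i := PySem.Chars.find s [',', ' ']
    if i < 0 then
      pvAliasToCanon.getD s s
    else
      let head := PySem.List.slice s none (some i)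
      pvAliasToCanon.getD head head ++ [',', ' '] ++
        pvNormCore fuel (PySem.List.slice s (some (i + 2)) none)

def normalize_genres_alt (genres_str : String) : String :=
  String.ofList (pvNormCore genres_str.toList.length genres_str.toList)

-- ===== PRECONDITION & SPEC =====
def Spec_normalize_genres (genres_str : String) (out : String) : Prop := out = normalize_genres_alt genres_str
instance (genres_str : String) (out : String) : Decidable (Spec_normalize_genres genres_str out) := by unfold Spec_normalize_genres; infer_instance

-- ===== CLAIM (what is proved, stated in full; the proofs are below) =====
def Claim_equal_normalize_genres : Prop := ∀ (genres_str : String), Dom_normalize_genres genres_str → Spec_normalize_genres genres_str (normalize_genres genres_str)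

-- ===== LEMMAS AND PROOFS =====

-- A's per-token body as a function (for rewriting the fold)
def pvLookupA (genre : String) : String :=
  match genre_mapping.items.find? (fun p => p.2.contains genre) with
  | some p => p.1
  | none => genre

-- A's per-token first-match scan over genre_mapping equals B's reverse-index lookup (on chars)
theorem tok_eq (t : List Char) :
    (pvLookupA (String.ofList t)).toList = pvAliasToCanon.getD t t := by
  by_cases h1 : t = "Study Aid".toList; · subst h1; decide
  by_cases h2 : t = "Study Aids".toList; · subst h2; decide
  by_cases h3 : t = "Self Help".toList; · subst h3; decide
  by_cases h4 : t = "Self-Help".toList; · subst h4; decide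
  by_cases h5 : t = "Children's books".toList; · subst h5; decide
  by_cases h6 : t = "Juvenile Fiction".toList; · subst h6; decide
  by_cases h7 : t = "Romance and Fiction".toList; · subst h7; decide
  by_cases h8 : t = "Philosophy".toList; · subst h8; decide
  by_cases h9 : t = "Bhagavadgītā".toList; · subst h9; decide
  have hof : ∀ a : String, t ≠ a.toList → String.ofList t ≠ a := by
    intro a ha he
    exact ha (by rw [← he]; simp)
  have s1 := hof _ h1; have s2 := hof _ h2; have s3 := hof _ h3
  have s4 := hof _ h4; have s5 := hof _ h5; have s6 := hof _ h6
  have s7 := hof _ h7; have s8 := hof _ h8; have s9 := hof _ h9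
  simp at h1 h2 h3 h4 h5 h6 h7 h8 h9
  simp [pvLookupA, genre_mapping, pvAliasToCanon, PySem.Dict.ofList, PySem.Dict.empty,
    PySem.Dict.insert, PySem.Dict.update, PySem.Dict.getD, PySem.Dict.get?,
    s1, s2, s3, s4, s5, s6, s7, s8, s9,
    Ne.symm h1, Ne.symm h2, Ne.symm h3, Ne.symm h4, Ne.symm h5, Ne.symm h6, Ne.symm h7,
    Ne.symm h8, Ne.symm h9]

-- drop 2 off a cons cell is the tail of the tail
theorem drop_two_cons (c : Char) (rest : List Char) : List.drop 2 (c :: rest) = rest.tail := by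
  cases rest <;> simp

theorem length_tail_eq (rest : List Char) : rest.tail.length = rest.length - 1 := by
  cases rest <;> simp

-- splitOn.go with enough fuel: the cur/acc accumulators distribute over the bare splitOn call
theorem go_spec : ∀ (n : Nat) (l : List Char), l.length ≤ n →
    ∀ (fuel : Nat) (cur : List Char) (acc : List (List Char)), l.length + 1 ≤ fuel →
    ∃ h t, PySem.Chars.splitOn l [',', ' '] = h :: t ∧
      PySem.Chars.splitOn.go [',', ' '] fuel l cur acc = acc.reverse ++ (cur.reverse ++ h) :: t := by
  intro n
  induction n with
  | zero =>
    intro l hl fuel cur acc hf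
    obtain rfl : l = [] := by cases l with | nil => rfl | cons a b => simp at hl
    obtain ⟨f, rfl⟩ : ∃ f, fuel = f + 1 := ⟨fuel - 1, by omega⟩
    refine ⟨[], [], ?_, ?_⟩
    · simp [PySem.Chars.splitOn, PySem.Chars.splitOn.go]
    · simp [PySem.Chars.splitOn.go]
  | succ n ih =>
    intro l hl fuel cur acc hf
    cases l with
    | nil =>
      obtain ⟨f, rfl⟩ : ∃ f, fuel = f + 1 := ⟨fuel - 1, by omega⟩
      refine ⟨[], [], ?_, ?_⟩
      · simp [PySem.Chars.splitOn, PySem.Chars.splitOn.go]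
      · simp [PySem.Chars.splitOn.go]
    | cons c rest =>
      obtain ⟨f, rfl⟩ : ∃ f, fuel = f + 1 := ⟨fuel - 1, by omega⟩
      simp only [List.length_cons] at hl hf
      have htl := length_tail_eq rest
      by_cases hp : ([',', ' '] : List Char).isPrefixOf (c :: rest) = true
      · -- separator starts here: go drops it and starts a new piece
        have hl' : rest.tail.length ≤ n := by omega
        obtain ⟨h, t, hS, hG⟩ := ih rest.tail hl' f [] (cur.reverse :: acc) (by omega)
        obtain ⟨h2, t2, hS2, hG2⟩ := ih rest.tail hl' (rest.length + 1) [] [[]] (by omega)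
        rw [hS] at hS2
        injection hS2 with e1 e2
        subst e1; subst e2
        refine ⟨[], h :: t, ?_, ?_⟩
        · simp [PySem.Chars.splitOn, PySem.Chars.splitOn.go, hp, hG2,
            show ([',', ' '] : List Char).length = 2 from rfl]
        · simp [PySem.Chars.splitOn.go, hp, hG,
            show ([',', ' '] : List Char).length = 2 from rfl]
      · -- no separator here: the head char joins the current piece
        have hl' : rest.length ≤ n := by omega
        obtain ⟨h, t, hS, hG⟩ := ih rest hl' f (c :: cur) acc (by omega)
        obtain ⟨h2, t2, hS2, hG2⟩ := ih rest hl' (rest.length + 1) [c] [] (by omega)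
        rw [hS] at hS2
        injection hS2 with e1 e2
        subst e1; subst e2
        refine ⟨c :: h, t, ?_, ?_⟩
        · simp [PySem.Chars.splitOn, PySem.Chars.splitOn.go, hp, hG2]
        · simp [PySem.Chars.splitOn.go, hp, hG]

-- find.go never returns below its start counter (other than the -1 failure)
theorem go_ge : ∀ (l : List Char) (k : Nat),
    PySem.Chars.find.go [',', ' '] l k = -1 ∨ (k : Int) ≤ PySem.Chars.find.go [',', ' '] l k := by
  intro l
  induction l with
  | nil => intro k; left; simp [PySem.Chars.find.go]
  | cons c rest ih =>
    intro k
    by_cases hp : ([',', ' '] : List Char).isPrefixOf (c :: rest) = true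
    · right; simp [PySem.Chars.find.go, hp]
    · rw [show PySem.Chars.find.go [',', ' '] (c :: rest) k
          = PySem.Chars.find.go [',', ' '] rest (k + 1) by simp [PySem.Chars.find.go, hp]]
      rcases ih (k + 1) with h | h
      · left; exact h
      · right; omega

-- shifting the start counter of find.go
theorem go_shift : ∀ (l : List Char) (k : Nat),
    PySem.Chars.find.go [',', ' '] l k =
      if PySem.Chars.find.go [',', ' '] l 0 = -1 then -1
      else (k : Int) + PySem.Chars.find.go [',', ' '] l 0 := by
  intro l
  induction l with
  | nil => intro k; simp [PySem.Chars.find.go]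
  | cons c rest ih =>
    intro k
    by_cases hp : ([',', ' '] : List Char).isPrefixOf (c :: rest) = true
    · simp [PySem.Chars.find.go, hp]
    · rw [show ∀ m : Nat, PySem.Chars.find.go [',', ' '] (c :: rest) m
          = PySem.Chars.find.go [',', ' '] rest (m + 1) from
          fun m => by simp [PySem.Chars.find.go, hp]]
      rw [show PySem.Chars.find.go [',', ' '] (c :: rest) 0
          = PySem.Chars.find.go [',', ' '] rest 1 by simp [PySem.Chars.find.go, hp]]
      rw [ih (k + 1), ih 1]
      rcases go_ge rest 0 with h | h
      · simp [h]
      · have hne : PySem.Chars.find.go [',', ' '] rest 0 ≠ -1 := by omega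
        rw [if_neg hne, if_neg hne]
        rw [if_neg (by push_cast; omega : ¬ (((1 : Nat) : Int)
          + PySem.Chars.find.go [',', ' '] rest 0 = -1))]
        push_cast; ring

-- find on a cons cell
theorem find_cons (c : Char) (rest : List Char) :
    PySem.Chars.find (c :: rest) [',', ' '] =
      if ([',', ' '] : List Char).isPrefixOf (c :: rest) = true then 0
      else if PySem.Chars.find rest [',', ' '] = -1 then -1
      else 1 + PySem.Chars.find rest [',', ' '] := by
  by_cases hp : ([',', ' '] : List Char).isPrefixOf (c :: rest) = true
  · simp [PySem.Chars.find, PySem.Chars.find.go, hp]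
  · rw [if_neg hp]
    simp only [PySem.Chars.find]
    rw [show PySem.Chars.find.go [',', ' '] (c :: rest) 0
        = PySem.Chars.find.go [',', ' '] rest 1 by simp [PySem.Chars.find.go, hp]]
    rw [go_shift rest 1]
    norm_num

theorem find_ge (s : List Char) :
    PySem.Chars.find s [',', ' '] = -1 ∨ 0 ≤ PySem.Chars.find s [',', ' '] := by
  have := go_ge s 0
  simpa [PySem.Chars.find] using this

-- no separator occurrence: one piece
theorem splitOn_of_find_neg : ∀ s : List Char, PySem.Chars.find s [',', ' '] = -1 →
    PySem.Chars.splitOn s [',', ' '] = [s] := by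
  intro s
  induction s with
  | nil => intro _; simp [PySem.Chars.splitOn, PySem.Chars.splitOn.go]
  | cons c rest ih =>
    intro h
    rw [find_cons] at h
    by_cases hp : ([',', ' '] : List Char).isPrefixOf (c :: rest) = true
    · rw [if_pos hp] at h; exact absurd h (by decide)
    · rw [if_neg hp] at h
      have hr : PySem.Chars.find rest [',', ' '] = -1 := by
        rcases find_ge rest with h' | h'
        · exact h'
        · rw [if_neg (by omega)] at h; omega
      obtain ⟨h1, t1, hS, hG⟩ := go_spec rest.length rest (le_refl _) (rest.length + 1) [c] []
        (by omega)
      rw [ih hr] at hS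
      injection hS with e1 e2
      subst e1
      rw [← e2] at hG
      simp [PySem.Chars.splitOn, PySem.Chars.splitOn.go, hp, hG]

-- first separator occurrence at n: first piece take n, rest after n+2
theorem splitOn_of_find_nat : ∀ (s : List Char) (n : Nat),
    PySem.Chars.find s [',', ' '] = (n : Int) →
    PySem.Chars.splitOn s [',', ' '] =
      s.take n :: PySem.Chars.splitOn (s.drop (n + 2)) [',', ' '] := by
  intro s
  induction s with
  | nil =>
    intro n h
    rw [show PySem.Chars.find [] [',', ' '] = -1 by
      simp [PySem.Chars.find, PySem.Chars.find.go]] at h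
    omega
  | cons c rest ih =>
    intro n h
    rw [find_cons] at h
    by_cases hp : ([',', ' '] : List Char).isPrefixOf (c :: rest) = true
    · rw [if_pos hp] at h
      obtain rfl : n = 0 := by omega
      obtain ⟨h1, t1, hS, hG2⟩ := go_spec rest.tail.length _ (le_refl _)
        (rest.length + 1) [] [[]] (by rw [length_tail_eq]; omega)
      rw [show (0 : Nat) + 2 = 2 from rfl, List.take_zero, drop_two_cons, hS]
      simp [PySem.Chars.splitOn, PySem.Chars.splitOn.go, hp, hG2,
        show ([',', ' '] : List Char).length = 2 from rfl]
    · rw [if_neg hp] at h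
      have hr : ∃ m : Nat, PySem.Chars.find rest [',', ' '] = (m : Int) := by
        rcases find_ge rest with h' | h'
        · rw [if_pos h'] at h; omega
        · exact ⟨(PySem.Chars.find rest [',', ' ']).toNat, by omega⟩
      obtain ⟨m, hm⟩ := hr
      rw [hm, if_neg (by omega)] at h
      obtain rfl : n = m + 1 := by omega
      obtain ⟨h1, t1, hS, hG⟩ := go_spec rest.length rest (le_refl _) (rest.length + 1) [c] []
        (by omega)
      rw [ih m hm] at hS
      injection hS with e1 e2
      subst e1
      rw [← e2] at hG
      rw [show (m + 1 : Nat) + 2 = (m + 2) + 1 from rfl, List.take_succ_cons, List.drop_succ_cons]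
      simp [PySem.Chars.splitOn, PySem.Chars.splitOn.go, hp, hG]

-- the no-separator case of the main loop (any fuel)
theorem core_neg (fuel : Nat) (s : List Char) (h : PySem.Chars.find s [',', ' '] = -1) :
    PySem.Chars.join [',', ' ']
      (List.map (fun t => pvAliasToCanon.getD t t) (PySem.Chars.splitOn s [',', ' ']))
      = pvNormCore fuel s := by
  rw [splitOn_of_find_neg s h]
  cases fuel with
  | zero => simp [pvNormCore, PySem.Chars.join_singleton]
  | succ f => simp [pvNormCore, h, PySem.Chars.join_singleton]

-- main loop equivalence: join o map-lookup o splitOn = B's recursive descent (fuel >= length)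
theorem core_eq : ∀ (fuel : Nat) (s : List Char), s.length ≤ fuel →
    PySem.Chars.join [',', ' ']
      (List.map (fun t => pvAliasToCanon.getD t t) (PySem.Chars.splitOn s [',', ' ']))
      = pvNormCore fuel s := by
  intro fuel
  induction fuel with
  | zero =>
    intro s hs
    obtain rfl : s = [] := by cases s with | nil => rfl | cons a b => simp at hs
    exact core_neg 0 [] (by simp [PySem.Chars.find, PySem.Chars.find.go])
  | succ n ih =>
    intro s hs
    rcases find_ge s with h | h
    · exact core_neg (n + 1) s h
    · obtain ⟨m, hm⟩ : ∃ m : Nat, PySem.Chars.find s [',', ' '] = (m : Int) :=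
        ⟨(PySem.Chars.find s [',', ' ']).toNat, by omega⟩
      have hne : PySem.Chars.find s [',', ' '] ≠ -1 := by omega
      have hspec := PySem.Chars.findFrom_natCast_spec s [',', ' '] 0 (Nat.zero_le _)
        (by simpa using hne)
      simp only [Nat.cast_zero, PySem.Chars.findFrom_zero, hm] at hspec
      have hlen := hspec.2.1.length_le
      simp only [List.length_drop, List.length_cons, List.length_nil, Int.toNat_natCast] at hlen
      have hIH := ih (s.drop (m + 2)) (by simp only [List.length_drop]; omega)
      obtain ⟨h1, t1, hS, -⟩ := go_spec (s.drop (m + 2)).length _ (le_refl _)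
        ((s.drop (m + 2)).length + 1) [] [] (by omega)
      rw [splitOn_of_find_nat s m hm, hS]
      rw [hS] at hIH
      simp only [List.map_cons] at hIH ⊢
      rw [PySem.Chars.join_cons_cons]
      simp only [pvNormCore, hm]
      rw [if_neg (by omega : ¬ ((m : Int) < 0))]
      rw [show ((m : Int) + 2) = ((m + 2 : Nat) : Int) by push_cast; ring]
      rw [PySem.List.slice_from_natCast, PySem.List.slice_to_natCast]
      rw [hIH]

-- the fold body appends exactly one looked-up token
theorem hstep : (fun (acc : List String) genre =>
      match genre_mapping.items.find? (fun p => p.2.contains genre) with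
      | some p => acc ++ [p.1]
      | none => acc ++ [genre]) =
    fun acc genre => acc ++ [pvLookupA genre] := by
  funext acc g
  unfold pvLookupA
  cases genre_mapping.items.find? (fun p => p.2.contains g) <;> simp

-- ===== VERDICT (by name: the statement is the Claim_ definition above) =====
theorem normalize_genres_spec : Claim_equal_normalize_genres := by
  intro s _
  unfold Spec_normalize_genres normalize_genres normalize_genres_alt
  simp only [hstep, PySem.List.foldl_append_singleton_eq_map, List.nil_append]
  have hsplit : (PySem.Str.split? s ", ").getD []
      = List.map String.ofList (PySem.Chars.splitOn s.toList [',', ' ']) := by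
    simp [PySem.Str.split?, PySem.Chars.split?]
  rw [hsplit]
  simp only [PySem.Str.join, List.map_map]
  apply congrArg
  have hsep : (", " : String).toList = [',', ' '] := by simp
  rw [hsep]
  have h1 : List.map (String.toList ∘ (pvLookupA ∘ String.ofList))
      (PySem.Chars.splitOn s.toList [',', ' '])
      = List.map (fun t => pvAliasToCanon.getD t t) (PySem.Chars.splitOn s.toList [',', ' ']) :=
    List.map_congr_left (fun t _ => tok_eq t)
  rw [h1, core_eq s.toList.length s.toList (le_refl _)]
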